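-- pv_equiv track=rewrite | github.com/AV3S-NTF/Logia | etap2/Ex2_LOGIA16v3.py | spr
-- ===== SOURCE A (Python) =====
-- def spr(word):
--     count = 0
--     biggest = 0
--
--     y = 0
--     length = len(word)
--
--     newWord = ""
--
--     lengthsList = [0]
--
--     for i in range(0, length):
--         if (word[i] == 'a' or word[i] == 'b'):
--             newWord += word[i]
--             y += 1
--             lengthsList.append(0)
--             lengthsList[y] += 1
--         else:
--             lengthsList[y] += 1
--
--     length = len(newWord)
--
--     for i in range(0, length - 1):
--         if (newWord[i] == 'a' and newWord[i + 1] == 'b'):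
--             count += lengthsList[i + 1] + lengthsList[i + 2]
--             if (i == 0):
--                 count += lengthsList[i]
--         else:
--             count = 0
--         if (count > biggest):
--             biggest = count
--
--     return biggest
-- ===== SOURCE B (Python) =====
-- def spr(word):
--     # Single pass over the original string, no filtered string and no segment-length
--     # list: track the positions/identities of the last two 'a'/'b' characters; a
--     # completed "ab" pair contributes the distance from its 'a' (or the start of the
--     # word if the 'a' is the first marker) to the next marker (or the end of the word).
--     n = len(word)
--     best = 0
--     nab = 0          # number of 'a'/'b' characters seen so far
--     pa = pb = 0      # positions of the last two markers (meaningful once set)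
--     ca = cb = ''     # the last two marker characters themselves
--     for p in range(n):
--         ch = word[p]
--         if ch == 'a' or ch == 'b':
--             if ca == 'a' and cb == 'b':
--                 best = max(best, p - (0 if nab == 2 else pa))
--             pa, ca = pb, cb
--             pb, cb = p, ch
--             nab += 1
--     if ca == 'a' and cb == 'b':
--         best = max(best, n - (0 if nab == 2 else pa))
--     return best
-- ===== Notes on version B (the rewrite author's own statement) =====
-- stated objective: alternative
-- what changed: B replaces A's two staged passes (build a filtered marker string plus a per-segment-length list, then run an accumulate/reset running count over it) by a single pass over the original word that keeps only the positions and identities of the last two 'a'/'b' markers and scores each completed 'ab' pair by position arithmetic (distance from its 'a', or the word start for the first marker, to the next marker or the word end), with no intermediate lists at all.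
import Mathlib
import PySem

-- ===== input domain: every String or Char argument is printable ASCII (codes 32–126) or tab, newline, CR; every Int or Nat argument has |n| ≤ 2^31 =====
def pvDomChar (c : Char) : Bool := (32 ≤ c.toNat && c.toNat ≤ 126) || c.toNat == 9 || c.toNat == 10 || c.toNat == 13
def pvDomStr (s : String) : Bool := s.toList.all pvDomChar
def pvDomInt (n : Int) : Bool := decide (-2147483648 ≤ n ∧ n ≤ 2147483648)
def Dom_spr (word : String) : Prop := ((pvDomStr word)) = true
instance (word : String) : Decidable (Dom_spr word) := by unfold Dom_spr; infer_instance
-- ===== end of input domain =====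

-- B is an alternative single-pass algorithm: it keeps only the positions/identities of
-- the last two 'a'/'b' markers and scores each completed "ab" pair by position
-- arithmetic, instead of A's two staged passes over a filtered string and a
-- segment-length list.

-- ===== PORT A =====
-- first loop: state (y, newWord, lengthsList); indices into lengthsList are always in
-- range in the Python, so list access is ported with getD (exact here)
def sprStep1 (st : Nat × List Char × List Int) (c : Char) : Nat × List Char × List Int :=
  let (y, nw, L) := st
  if c = 'a' ∨ c = 'b' then
    let nw := nw ++ [c]
    let y := y + 1
    let L := L ++ [(0 : Int)]
    (y, nw, L.set y (L.getD y 0 + 1))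
  else
    (y, nw, L.set y (L.getD y 0 + 1))

-- second loop: state (count, biggest); newWord/lengthsList indices always in range
def sprStep2 (nw : List Char) (L : List Int) (st : Int × Int) (i : Nat) : Int × Int :=
  let (count, biggest) := st
  let count :=
    if nw.getD i ' ' = 'a' ∧ nw.getD (i + 1) ' ' = 'b' then
      let count := count + L.getD (i + 1) 0 + L.getD (i + 2) 0
      if i = 0 then count + L.getD i 0 else count
    else 0
  let biggest := if count > biggest then count else biggest
  (count, biggest)

def spr (word : String) : Int :=
  let s1 := word.toList.foldl sprStep1 (0, [], [0])
  let nw := s1.2.1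
  let L := s1.2.2
  ((List.range (nw.length - 1)).foldl (sprStep2 nw L) (0, 0)).2

-- ===== PORT B =====
-- single pass: state (best, nab, pa, ca, pb, cb); Python's '' sentinels for ca/cb are
-- Option Char none; word[p] is read with getD (p ranges over range(n), always in range)
def sprAltStep (cs : List Char)
    (st : Int × Int × Int × Option Char × Int × Option Char) (p : Nat) :
    Int × Int × Int × Option Char × Int × Option Char :=
  let (best, nab, pa, ca, pb, cb) := st
  let ch := cs.getD p ' '
  if ch = 'a' ∨ ch = 'b' then
    let best := if ca = some 'a' ∧ cb = some 'b' then
        max best ((p : Int) - (if nab = 2 then 0 else pa)) else best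
    (best, nab + 1, pb, cb, (p : Int), some ch)
  else
    (best, nab, pa, ca, pb, cb)

def spr_alt (word : String) : Int :=
  let cs := word.toList
  let n := cs.length
  let s := (List.range n).foldl (sprAltStep cs) (0, 0, 0, none, 0, none)
  let best := s.1
  let nab := s.2.1
  let pa := s.2.2.1
  let ca := s.2.2.2.1
  let cb := s.2.2.2.2.2
  if ca = some 'a' ∧ cb = some 'b' then
    max best ((n : Int) - (if nab = 2 then 0 else pa))
  else best

-- ===== PRECONDITION & SPEC =====
def Spec_spr (word : String) (out : Int) : Prop := out = spr_alt word
instance (word : String) (out : Int) : Decidable (Spec_spr word out) := by unfold Spec_spr; infer_instance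

-- ===== CLAIM (what is proved, stated in full; the proofs are below) =====
def Claim_equal_spr : Prop := ∀ (word : String), Dom_spr word → Spec_spr word (spr word)

-- ===== LEMMAS AND PROOFS =====

-- positions of the 'a'/'b' markers among the first k characters
def Fk (cs : List Char) (k : Nat) : List Nat :=
  (List.range k).filter (fun i => decide (cs.getD i ' ' = 'a' ∨ cs.getD i ' ' = 'b'))

-- the filtered marker string of the first k characters
def patk (cs : List Char) (k : Nat) : List Char :=
  (Fk cs k).map (fun i => cs.getD i ' ')

def pz (P : List Nat) : List Int := P.map Int.ofNat

-- A's lengthsList, reconstructed from the marker positions and the prefix length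
def Lof (P : List Nat) (n : Nat) : List Int :=
  List.zipWith (fun (a b : Int) => a - b) (pz P ++ [(n : Int)]) ((0 : Int) :: pz P)

def mtch (nw : List Char) (i : Nat) : Bool :=
  decide (nw.getD i ' ' = 'a' ∧ nw.getD (i + 1) ' ' = 'b')

def abVal (L : List Int) (i : Nat) : Int :=
  L.getD (i + 1) 0 + L.getD (i + 2) 0 + (if i = 0 then L.getD 0 0 else 0)

-- value of a match at filtered index j from positions only; valC has all indices in
-- range (closed matches), valP uses the prefix length n for the final open segment
def valC (P : List Nat) (j : Nat) : Int :=
  (pz P).getD (j + 2) 0 - (if j = 0 then 0 else (pz P).getD j 0)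

def valP (P : List Nat) (n : Nat) (j : Nat) : Int :=
  (pz P).getD (j + 2) (n : Int) - (if j = 0 then 0 else (pz P).getD j 0)

-- B's register block (pa, ca, pb, cb), determined by the marker positions
def last2 (cs : List Char) (P : List Nat) : Int × Option Char × Int × Option Char :=
  if 2 ≤ P.length then
    ((P.getD (P.length - 2) 0 : Int), some (cs.getD (P.getD (P.length - 2) 0) ' '),
     (P.getD (P.length - 1) 0 : Int), some (cs.getD (P.getD (P.length - 1) 0) ' '))
  else if P.length = 1 then
    (0, none, (P.getD 0 0 : Int), some (cs.getD (P.getD 0 0) ' '))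
  else (0, none, 0, none)

def bestC (C : List Char) (P : List Nat) (m : Nat) : Int :=
  (((List.range m).filter (mtch C)).map (valC P)).foldl max 0

-- B's best register: the max over the already-closed matches
def bestOf (cs : List Char) (k : Nat) : Int :=
  bestC (patk cs k) (Fk cs k) ((Fk cs k).length - 2)

-- generic list utilities
theorem getD_in (l : List Int) (i : Nat) (d d' : Int) (h : i < l.length) :
    l.getD i d = l.getD i d' := by
  rw [List.getD_eq_getElem l d h, List.getD_eq_getElem l d' h]

theorem getD_zip (a b : List Int) (i : Nat) (d : Int) (h1 : i < a.length) (h2 : i < b.length) :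
    (List.zipWith (fun (x y : Int) => x - y) a b).getD i d = a.getD i 0 - b.getD i 0 := by
  have h : i < (List.zipWith (fun (x y : Int) => x - y) a b).length := by
    simp [List.length_zipWith]; omega
  rw [List.getD_eq_getElem _ _ h, List.getElem_zipWith,
    List.getD_eq_getElem a 0 h1, List.getD_eq_getElem b 0 h2]

theorem getD_map' (cs : List Char) (P : List Nat) (j : Nat) (h : j < P.length) :
    (P.map (fun i => cs.getD i ' ')).getD j ' ' = cs.getD (P.getD j 0) ' ' := by
  rw [List.getD_eq_getElem _ _ (by simpa using h), List.getElem_map,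
    List.getD_eq_getElem P 0 h]

theorem pz_getD (P : List Nat) (j : Nat) (d : Int) (h : j < P.length) :
    (pz P).getD j d = ((P.getD j 0 : Nat) : Int) := by
  rw [List.getD_eq_getElem _ _ (by simpa [pz] using h)]
  unfold pz
  rw [List.getElem_map, List.getD_eq_getElem P 0 h]
  simp

theorem foldl_max_append (l : List Int) (a v : Int) :
    (l ++ [v]).foldl max a = max (l.foldl max a) v := by simp

theorem foldl_max_ge (l : List Int) (a : Int) : a ≤ l.foldl max a := by
  induction l generalizing a with
  | nil => simp
  | cons x xs ih => exact le_trans (le_max_left a x) (ih (max a x))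

theorem split_last (q : Nat → Bool) (f : Nat → Int) (m : Nat) :
    (((List.range (m + 1)).filter q).map f).foldl max 0 =
      if q m then max ((((List.range m).filter q).map f).foldl max 0) (f m)
      else (((List.range m).filter q).map f).foldl max 0 := by
  rw [List.range_succ, List.filter_append, List.map_append]
  by_cases h : q m <;> simp [h]

theorem fold_congr (q q' : Nat → Bool) (f g : Nat → Int) (m : Nat)
    (hq : ∀ j, j < m → q j = q' j) (hf : ∀ j, j < m → f j = g j) :
    (((List.range m).filter q).map f).foldl max 0 =
      (((List.range m).filter q').map g).foldl max 0 := by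
  rw [List.filter_congr (fun a ha => hq a (List.mem_range.mp ha))]
  rw [List.map_congr_left
    (fun a ha => hf a (List.mem_range.mp (List.mem_filter.mp ha).1))]

-- the marker-position list grows on the right
theorem Fk_succ (cs : List Char) (k : Nat) :
    Fk cs (k + 1) =
      if cs.getD k ' ' = 'a' ∨ cs.getD k ' ' = 'b' then Fk cs k ++ [k] else Fk cs k := by
  unfold Fk
  rw [List.range_succ, List.filter_append]
  by_cases h : cs.getD k ' ' = 'a' ∨ cs.getD k ' ' = 'b'
  · have hd : decide (cs.getD k ' ' = 'a' ∨ cs.getD k ' ' = 'b') = true := decide_eq_true h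
    rw [if_pos h]
    simp only [List.filter_cons, List.filter_nil, hd, if_true]
  · have hd : decide (cs.getD k ' ' = 'a' ∨ cs.getD k ' ' = 'b') = false :=
      decide_eq_false h
    rw [if_neg h]
    simp only [List.filter_cons, List.filter_nil, hd, Bool.false_eq_true, if_false,
      List.append_nil]

theorem Lof_len (P : List Nat) (n : Nat) : (Lof P n).length = P.length + 1 := by
  simp [Lof, pz]

theorem pz_append (P : List Nat) (k : Nat) : pz (P ++ [k]) = pz P ++ [(k : Int)] := by
  unfold pz; rw [List.map_append]; rfl

theorem Lof_append (P : List Nat) (k : Nat) : Lof (P ++ [k]) (k + 1) = Lof P k ++ [1] := by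
  unfold Lof
  rw [pz_append]
  have h2 : ((0 : Int) :: (pz P ++ [(k : Int)]))
      = ((0 : Int) :: pz P) ++ [(k : Int)] := by simp
  have h3 : (pz P ++ [(k : Int)]) ++ [((k + 1 : Nat) : Int)]
      = (pz P ++ [(k : Int)]) ++ [((k + 1 : Nat) : Int)] := rfl
  rw [h2, List.zipWith_append (by simp)]
  congr 1
  simp

theorem zip_bump (xs ys : List Int) (k : Int) (h : ys.length = xs.length + 1) :
    (List.zipWith (fun (a b : Int) => a - b) (xs ++ [k]) ys).set xs.length
      ((List.zipWith (fun (a b : Int) => a - b) (xs ++ [k]) ys).getD xs.length 0 + 1)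
      = List.zipWith (fun (a b : Int) => a - b) (xs ++ [k + 1]) ys := by
  induction xs generalizing ys with
  | nil =>
    match ys with
    | [y] => simp; ring_nf
  | cons x xs ih =>
    match ys with
    | y :: ys =>
      simp only [List.cons_append, List.zipWith_cons_cons, List.length_cons,
        List.set_cons_succ, List.getD_cons_succ]
      rw [ih ys (by simpa using h)]

theorem Lof_bump (P : List Nat) (k : Nat) :
    (Lof P k).set P.length ((Lof P k).getD P.length 0 + 1) = Lof P (k + 1) := by
  unfold Lof
  have hl : P.length = (pz P).length := by simp [pz]
  rw [hl, zip_bump (pz P) ((0 : Int) :: pz P) (k : Int) (by simp)]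
  push_cast
  ring_nf

theorem bump0 (L : List Int) :
    (L ++ [(0 : Int)]).set L.length ((L ++ [(0 : Int)]).getD L.length 0 + 1) = L ++ [1] := by
  have h1 : (L ++ [(0 : Int)]).getD L.length 0 = 0 := by
    rw [List.getD_append_right _ _ _ _ (le_refl _)]; simp
  rw [h1]
  rw [List.set_append_right _ _ (le_refl _)]
  simp

theorem A_inv (cs : List Char) (k : Nat) (hk : k ≤ cs.length) :
    (cs.take k).foldl sprStep1 (0, [], [0]) =
      ((Fk cs k).length, patk cs k, Lof (Fk cs k) k) := by
  induction k with
  | zero => simp [Fk, patk, Lof, pz]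
  | succ k ih =>
    have hklt : k < cs.length := by omega
    have htake : cs.take (k + 1) = cs.take k ++ [cs.getD k ' '] := by
      rw [List.take_add_one, List.getElem?_eq_getElem hklt, List.getD_eq_getElem cs ' ' hklt]
      rfl
    rw [htake, List.foldl_append, ih (by omega)]
    by_cases h : cs.getD k ' ' = 'a' ∨ cs.getD k ' ' = 'b'
    · simp only [sprStep1, h, if_pos, List.foldl_cons, List.foldl_nil]
      have hfk : Fk cs (k + 1) = Fk cs k ++ [k] := by rw [Fk_succ, if_pos h]
      have hpat : patk cs (k + 1) = patk cs k ++ [cs.getD k ' '] := by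
        unfold patk; rw [hfk, List.map_append]; simp
      have hLlen : (Lof (Fk cs k) k).length = (Fk cs k).length + 1 := Lof_len _ _
      rw [hfk, hpat, Lof_append]
      simp only [Prod.mk.injEq]
      refine ⟨by simp, by simp, ?_⟩
      rw [← hLlen]
      exact bump0 _
    · simp only [sprStep1, h, if_false, List.foldl_cons, List.foldl_nil]
      have hfk : Fk cs (k + 1) = Fk cs k := by rw [Fk_succ, if_neg h]
      have hpat : patk cs (k + 1) = patk cs k := by unfold patk; rw [hfk]
      rw [hfk, hpat]
      simp only [Prod.mk.injEq]
      exact ⟨by simp, by simp, Lof_bump _ _⟩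

theorem no_adjacent (pat : List Char) (i : Nat)
    (h : mtch pat (i + 1) = true) : mtch pat i = false := by
  simp only [mtch, decide_eq_true_eq] at h
  simp only [mtch, decide_eq_false_iff_not]
  rintro ⟨-, h2⟩
  exact absurd (h2.symm.trans h.1) (by decide)

theorem pass2_inv (nw : List Char) (L : List Int) (k : Nat) :
    (List.range k).foldl (sprStep2 nw L) (0, 0) =
      ((if _h : 0 < k ∧ mtch nw (k - 1) then abVal L (k - 1) else 0),
       (((List.range k).filter (mtch nw)).map (abVal L)).foldl max 0) := by
  induction k with
  | zero => simp
  | succ k ih =>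
    rw [List.range_succ, List.foldl_append, List.filter_append, List.map_append, ih]
    simp only [List.foldl_cons, List.foldl_nil, List.filter_cons, List.filter_nil]
    by_cases hm : mtch nw k = true
    · have hprev : ¬ (0 < k ∧ mtch nw (k - 1) = true) := by
        rintro ⟨hk, hp⟩
        have hke : k - 1 + 1 = k := by omega
        have := no_adjacent nw (k - 1) (by rw [hke]; exact hm)
        rw [hp] at this; exact absurd this (by decide)
      rw [dif_neg hprev]
      have hm' : nw.getD k ' ' = 'a' ∧ nw.getD (k + 1) ' ' = 'b' := by
        simpa [mtch] using hm
      simp only [sprStep2, hm', and_self, if_pos, hm]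
      simp only [Prod.mk.injEq]
      constructor
      · simp only [dif_pos (show 0 < k + 1 ∧ mtch nw (k + 1 - 1)
          from ⟨Nat.succ_pos k, by simpa using hm⟩)]
        simp [abVal]
        by_cases h0 : k = 0 <;> simp [h0]
      · rw [show List.map (fun i => abVal L i) [k] = [abVal L k] from by simp,
          foldl_max_append]
        set b := (((List.range k).filter (mtch nw)).map (fun i => abVal L i)).foldl max 0 with hb
        have hv : (if k = 0 then 0 + L.getD (k + 1) 0 + L.getD (k + 2) 0 + L.getD k 0
            else 0 + L.getD (k + 1) 0 + L.getD (k + 2) 0) = abVal L k := by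
          simp [abVal]
          by_cases h0 : k = 0 <;> simp [h0]
        rw [hv]
        by_cases hgt : abVal L k > b <;> simp [hgt] <;> omega
    · simp only [sprStep2, hm, Bool.false_eq_true, if_false]
      have hm'' : ¬ (nw.getD k ' ' = 'a' ∧ nw.getD (k + 1) ' ' = 'b') := fun hcon =>
        hm (by simp only [mtch]; exact decide_eq_true ⟨hcon.1, hcon.2⟩)
      rw [if_neg hm'']
      simp only [Prod.mk.injEq]
      constructor
      · rw [dif_neg]; rintro ⟨_, hp⟩; simp at hp; rw [hp] at hm; exact hm rfl
      · set b := (((List.range k).filter (mtch nw)).map (fun i => abVal L i)).foldl max 0 with hb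
        have hb0 : (0 : Int) ≤ b := foldl_max_ge _ 0
        simp only [List.map_nil, List.append_nil]
        rw [if_neg (by omega)]

theorem mtch_append (C : List Char) (c : Char) (j : Nat) (h : j + 1 < C.length) :
    mtch (C ++ [c]) j = mtch C j := by
  unfold mtch
  rw [List.getD_append _ _ _ _ (by omega), List.getD_append _ _ _ _ h]

theorem valC_append (P : List Nat) (k : Nat) (j : Nat) (h : j + 2 < P.length) :
    valC (P ++ [k]) j = valC P j := by
  unfold valC
  have hpz : pz (P ++ [k]) = pz P ++ [(k : Int)] := by simp [pz]
  have hl : (pz P).length = P.length := by simp [pz]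
  rw [hpz, List.getD_append _ _ _ _ (by omega)]
  by_cases h0 : j = 0
  · simp [h0]
  · rw [if_neg h0, if_neg h0, List.getD_append _ _ _ _ (by omega)]

theorem valC_last (P : List Nat) (k : Nat) (h2 : 2 ≤ P.length) :
    valC (P ++ [k]) (P.length - 2) =
      (k : Int) - (if P.length = 2 then 0 else ((P.getD (P.length - 2) 0 : Nat) : Int)) := by
  unfold valC
  have hpz : pz (P ++ [k]) = pz P ++ [(k : Int)] := by simp [pz]
  have hl : (pz P).length = P.length := by simp [pz]
  have hidx : P.length - 2 + 2 = P.length := by omega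
  rw [hpz, hidx, List.getD_append_right _ _ _ _ (by omega), hl]
  simp only [Nat.sub_self, List.getD_cons_zero]
  congr 1
  by_cases h0 : P.length = 2
  · rw [if_pos (by omega), if_pos h0]
  · rw [if_neg (by omega), if_neg h0, List.getD_append _ _ _ _ (by omega),
      pz_getD _ _ _ (by omega)]

theorem valP_eq_valC (P : List Nat) (n : Nat) (j : Nat) (h : j + 2 < P.length) :
    valP P n j = valC P j := by
  unfold valP valC
  rw [getD_in _ _ _ 0 (by simp [pz]; omega)]

theorem valP_last (P : List Nat) (n : Nat) (h2 : 2 ≤ P.length) :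
    valP P n (P.length - 2) =
      (n : Int) - (if P.length = 2 then 0 else ((P.getD (P.length - 2) 0 : Nat) : Int)) := by
  unfold valP
  have hidx : P.length - 2 + 2 = P.length := by omega
  rw [hidx, List.getD_eq_default _ _ (by simp [pz])]
  congr 1
  by_cases h0 : P.length = 2
  · rw [if_pos (by omega), if_pos h0]
  · rw [if_neg (by omega), if_neg h0, pz_getD _ _ _ (by omega)]

theorem abVal_eq_valP (P : List Nat) (n : Nat) (j : Nat) (h : j + 1 < P.length) :
    abVal (Lof P n) j = valP P n j := by
  unfold abVal valP Lof
  have hlen : (pz P).length = P.length := by simp [pz]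
  have e1 : (pz P ++ [(n : Int)]).getD (j + 1) 0 = (pz P).getD (j + 1) 0 :=
    List.getD_append _ _ _ _ (by omega)
  have e2 : (pz P ++ [(n : Int)]).getD (j + 2) 0 = (pz P).getD (j + 2) (n : Int) := by
    by_cases hc : j + 2 < P.length
    · rw [List.getD_append _ _ _ _ (by omega)]
      exact getD_in _ _ _ _ (by omega)
    · have hi : j + 2 - (pz P).length = 0 := by omega
      rw [List.getD_eq_default (pz P) _ (show (pz P).length ≤ j + 2 by omega),
        List.getD_append_right _ _ _ _ (by omega), hi]
      rfl
  have e3 : ((0 : Int) :: pz P).getD (j + 1) 0 = (pz P).getD j 0 := by simp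
  have e4 : ((0 : Int) :: pz P).getD (j + 2) 0 = (pz P).getD (j + 1) 0 := by simp
  have e5 : (pz P ++ [(n : Int)]).getD 0 0 = (pz P).getD 0 0 :=
    List.getD_append _ _ _ _ (by omega)
  have e6 : ((0 : Int) :: pz P).getD 0 0 = 0 := rfl
  rw [getD_zip _ _ (j + 1) 0 (by simp [pz]; omega) (by simp [pz]; omega),
    getD_zip _ _ (j + 2) 0 (by simp [pz]; omega) (by simp [pz]; omega),
    getD_zip _ _ 0 0 (by simp [pz]) (by simp [pz])]
  rw [e1, e2, e3, e4, e5, e6]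
  by_cases h0 : j = 0
  · subst h0
    simp only [if_true]
    ring
  · rw [if_neg h0, if_neg h0]
    ring

theorem mtch_last (cs : List Char) (P : List Nat) (h2 : 2 ≤ P.length) :
    mtch (P.map (fun i => cs.getD i ' ')) (P.length - 2) =
      decide (cs.getD (P.getD (P.length - 2) 0) ' ' = 'a' ∧
        cs.getD (P.getD (P.length - 1) 0) ' ' = 'b') := by
  unfold mtch
  have hidx : P.length - 2 + 1 = P.length - 1 := by omega
  rw [getD_map' cs P _ (by omega), hidx, getD_map' cs P _ (by omega)]

theorem last2_append (cs : List Char) (P : List Nat) (k : Nat) :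
    last2 cs (P ++ [k]) = ((last2 cs P).2.2.1, (last2 cs P).2.2.2, (k : Int),
      some (cs.getD k ' ')) := by
  unfold last2
  have hl : (P ++ [k]).length = P.length + 1 := by simp
  by_cases h2 : 2 ≤ P.length
  · rw [if_pos (by omega : 2 ≤ (P ++ [k]).length), if_pos h2]
    have e1 : (P ++ [k]).length - 2 = P.length - 1 := by omega
    have e2 : (P ++ [k]).length - 1 = P.length := by omega
    rw [hl] at e1 e2 ⊢
    rw [e1, e2, List.getD_append _ _ _ _ (by omega),
      List.getD_append_right _ _ _ _ (le_refl _)]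
    simp
  · by_cases h1 : P.length = 1
    · rw [if_pos (by omega : 2 ≤ (P ++ [k]).length), if_neg h2, if_pos h1]
      have e1 : (P ++ [k]).length - 2 = 0 := by omega
      have e2 : (P ++ [k]).length - 1 = 1 := by omega
      rw [e1, e2, List.getD_append _ _ _ _ (by omega),
        List.getD_append_right _ _ _ _ (by omega)]
      simp [h1]
    · have h0 : P.length = 0 := by omega
      rw [if_neg (by omega : ¬ 2 ≤ (P ++ [k]).length), if_pos (by omega : (P ++ [k]).length = 1),
        if_neg h2, if_neg h1]
      have : P = [] := List.length_eq_zero_iff.mp h0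
      subst this
      simp

theorem bestC_zero (C : List Char) (P : List Nat) : bestC C P 0 = 0 := by
  simp [bestC]

theorem cast_two_iff (m : Nat) : ((m : Int) = 2) ↔ (m = 2) := by omega

theorem last2_big (cs : List Char) (P : List Nat) (h2 : 2 ≤ P.length) :
    last2 cs P = ((P.getD (P.length - 2) 0 : Int),
      some (cs.getD (P.getD (P.length - 2) 0) ' '),
      (P.getD (P.length - 1) 0 : Int),
      some (cs.getD (P.getD (P.length - 1) 0) ' ')) := by
  unfold last2; rw [if_pos h2]

theorem bestOf_step (cs : List Char) (k : Nat)
    (h : cs.getD k ' ' = 'a' ∨ cs.getD k ' ' = 'b') :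
    bestOf cs (k + 1) =
      if (last2 cs (Fk cs k)).2.1 = some 'a' ∧ (last2 cs (Fk cs k)).2.2.2 = some 'b' then
        max (bestOf cs k)
          ((k : Int) -
            (if ((Fk cs k).length : Int) = 2 then 0 else (last2 cs (Fk cs k)).1))
      else bestOf cs k := by
  have hfk : Fk cs (k + 1) = Fk cs k ++ [k] := by rw [Fk_succ, if_pos h]
  have hpat : patk cs (k + 1) = patk cs k ++ [cs.getD k ' '] := by
    unfold patk; rw [hfk, List.map_append]; simp
  have hCl : (patk cs k).length = (Fk cs k).length := by simp [patk]
  by_cases hP : 2 ≤ (Fk cs k).length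
  · have hm1 : (Fk cs (k + 1)).length - 2 = ((Fk cs k).length - 2) + 1 := by
      rw [hfk]; simp; omega
    unfold bestOf
    rw [hm1, hfk, hpat]
    unfold bestC
    rw [split_last]
    have hq : mtch (patk cs k ++ [cs.getD k ' ']) ((Fk cs k).length - 2) =
        mtch (patk cs k) ((Fk cs k).length - 2) :=
      mtch_append _ _ _ (by omega)
    have hfold : ((((List.range ((Fk cs k).length - 2)).filter
          (mtch (patk cs k ++ [cs.getD k ' ']))).map (valC (Fk cs k ++ [k]))).foldl max 0) =
        (((List.range ((Fk cs k).length - 2)).filter (mtch (patk cs k))).map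
          (valC (Fk cs k))).foldl max 0 :=
      fold_congr _ _ _ _ _ (fun j hj => mtch_append _ _ _ (by omega))
        (fun j hj => valC_append _ _ _ (by omega))
    rw [hfold, hq]
    have hC : patk cs k = (Fk cs k).map (fun i => cs.getD i ' ') := rfl
    rw [hC, mtch_last cs (Fk cs k) hP, last2_big cs (Fk cs k) hP]
    simp only [Option.some.injEq]
    by_cases hcond : cs.getD ((Fk cs k).getD ((Fk cs k).length - 2) 0) ' ' = 'a' ∧
        cs.getD ((Fk cs k).getD ((Fk cs k).length - 1) 0) ' ' = 'b'
    · rw [if_pos (decide_eq_true hcond), if_pos hcond]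
      rw [valC_last _ _ hP]
      rw [if_congr (cast_two_iff (Fk cs k).length) rfl rfl]
    · rw [if_neg (by simpa using hcond), if_neg hcond]
  · have h0 : (Fk cs (k + 1)).length - 2 = 0 := by rw [hfk]; simp; omega
    have h0' : (Fk cs k).length - 2 = 0 := by omega
    unfold bestOf
    rw [h0, h0', bestC_zero, bestC_zero]
    have hcond : ¬ ((last2 cs (Fk cs k)).2.1 = some 'a' ∧
        (last2 cs (Fk cs k)).2.2.2 = some 'b') := by
      unfold last2
      rw [if_neg hP]
      by_cases h1 : (Fk cs k).length = 1 <;> simp [h1]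
    rw [if_neg hcond]

theorem B_inv (cs : List Char) (k : Nat) (hk : k ≤ cs.length) :
    (List.range k).foldl (sprAltStep cs) (0, 0, 0, none, 0, none) =
      (bestOf cs k, ((Fk cs k).length : Int), last2 cs (Fk cs k)) := by
  induction k with
  | zero =>
    simp [bestOf, bestC, Fk, patk, last2]
  | succ k ih =>
    rw [List.range_succ, List.foldl_append, ih (by omega)]
    simp only [List.foldl_cons, List.foldl_nil]
    rcases hlast : last2 cs (Fk cs k) with ⟨pa, ca, pb, cb⟩
    by_cases h : cs.getD k ' ' = 'a' ∨ cs.getD k ' ' = 'b'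
    · have hfk : Fk cs (k + 1) = Fk cs k ++ [k] := by rw [Fk_succ, if_pos h]
      have hbest := bestOf_step cs k h
      rw [hlast] at hbest
      simp only [sprAltStep, h, if_pos]
      rw [hbest, hfk, last2_append, hlast]
      simp
    · have hfk : Fk cs (k + 1) = Fk cs k := by rw [Fk_succ, if_neg h]
      have hpat : patk cs (k + 1) = patk cs k := by unfold patk; rw [hfk]
      have hbest : bestOf cs (k + 1) = bestOf cs k := by
        unfold bestOf; rw [hfk, hpat]
      simp only [sprAltStep, h, if_false]
      rw [hbest, hfk, hlast]

theorem final_eq (cs : List Char) (P : List Nat) (n : Nat) :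
    (((List.range ((P.map (fun i => cs.getD i ' ')).length - 1)).filter
        (mtch (P.map (fun i => cs.getD i ' ')))).map (abVal (Lof P n))).foldl max 0 =
      if (last2 cs P).2.1 = some 'a' ∧ (last2 cs P).2.2.2 = some 'b' then
        max (bestC (P.map (fun i => cs.getD i ' ')) P (P.length - 2))
          ((n : Int) - (if ((P.length : Int)) = 2 then 0 else (last2 cs P).1))
      else bestC (P.map (fun i => cs.getD i ' ')) P (P.length - 2) := by
  rw [List.length_map]
  by_cases hP : 2 ≤ P.length
  · have hm1 : P.length - 1 = (P.length - 2) + 1 := by omega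
    rw [hm1, split_last]
    have hfold : (((List.range (P.length - 2)).filter
          (mtch (P.map (fun i => cs.getD i ' ')))).map (abVal (Lof P n))).foldl max 0 =
        (((List.range (P.length - 2)).filter (mtch (P.map (fun i => cs.getD i ' ')))).map
          (valC P)).foldl max 0 :=
      fold_congr _ _ _ _ _ (fun j hj => rfl)
        (fun j hj => (abVal_eq_valP P n j (by omega)).trans (valP_eq_valC P n j (by omega)))
    rw [hfold]
    have hlastval : abVal (Lof P n) (P.length - 2) = valP P n (P.length - 2) :=
      abVal_eq_valP P n _ (by omega)
    rw [hlastval, valP_last _ _ hP, mtch_last cs P hP, last2_big cs P hP]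
    simp only [Option.some.injEq]
    by_cases hcond : cs.getD (P.getD (P.length - 2) 0) ' ' = 'a' ∧
        cs.getD (P.getD (P.length - 1) 0) ' ' = 'b'
    · rw [if_pos (decide_eq_true hcond), if_pos hcond]
      rw [if_congr (cast_two_iff P.length) rfl rfl]
      rfl
    · rw [if_neg (by simpa using hcond), if_neg hcond]
      rfl
  · have h1 : P.length - 1 = 0 := by omega
    have h0 : P.length - 2 = 0 := by omega
    rw [h1, h0, bestC_zero]
    have hcond : ¬ ((last2 cs P).2.1 = some 'a' ∧ (last2 cs P).2.2.2 = some 'b') := by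
      unfold last2
      rw [if_neg hP]
      by_cases hx : P.length = 1 <;> simp [hx]
    rw [if_neg hcond]
    simp

-- ===== VERDICT (by name: the statement is the Claim_ definition above) =====
theorem spr_spec : Claim_equal_spr := by
  intro word _
  unfold Spec_spr spr spr_alt
  have hA := A_inv word.toList word.toList.length (le_refl _)
  rw [List.take_length] at hA
  dsimp only
  rw [hA, B_inv word.toList word.toList.length (le_refl _)]
  dsimp only
  rw [pass2_inv]
  dsimp only
  have hpat : patk word.toList word.toList.length =
      (Fk word.toList word.toList.length).map (fun i => word.toList.getD i ' ') := rfl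
  rw [hpat]
  exact final_eq word.toList (Fk word.toList word.toList.length) word.toList.length
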